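-- pv_equiv track=rewrite | github.com/alexandertataurov/vpn-suite | backend/app/api/v1/webapp.py | _extract_plan_style
-- ===== SOURCE A (Python) =====
-- def _extract_plan_style(name: str) -> tuple[str, str]:
--     """Derive style + clean display name from stored plan name.
--
--     Convention (case-insensitive prefix):
--     - "[promo]" -> "promotional"
--     - "[popular]" -> "popular"
--     - "[normal]" or no prefix -> "normal"
--     """
--     raw = (name or "").strip()
--     lowered = raw.lower()
--     prefixes: list[tuple[str, str]] = [
--         ("[promo]", "promotional"),
--         ("[popular]", "popular"),
--         ("[normal]", "normal"),
--     ]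
--     for token, style in prefixes:
--         if lowered.startswith(token):
--             clean = raw[len(token) :].lstrip()
--             return style, clean or raw
--     return "normal", raw
-- ===== SOURCE B (Python) =====
-- _STYLES = {"promo": "promotional", "popular": "popular", "normal": "normal"}
--
--
-- def _extract_plan_style(name: str) -> tuple[str, str]:
--     """Derive style + clean display name from stored plan name."""
--     raw = (name or "").strip()
--     if raw.startswith("["):
--         close = raw.find("]")
--         if close != -1:
--             style = _STYLES.get(raw[1:close].lower())
--             if style is not None:
--                 return style, raw[close + 1:].lstrip() or raw
--     return "normal", raw
-- ===== Notes on version B (the rewrite author's own statement) =====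
-- stated objective: alternative
-- what changed: Instead of looping over three full bracketed prefixes and testing startswith for each, B extracts the tag between a leading '[' and the first ']' once and maps it through a dict of styles.
import Mathlib
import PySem

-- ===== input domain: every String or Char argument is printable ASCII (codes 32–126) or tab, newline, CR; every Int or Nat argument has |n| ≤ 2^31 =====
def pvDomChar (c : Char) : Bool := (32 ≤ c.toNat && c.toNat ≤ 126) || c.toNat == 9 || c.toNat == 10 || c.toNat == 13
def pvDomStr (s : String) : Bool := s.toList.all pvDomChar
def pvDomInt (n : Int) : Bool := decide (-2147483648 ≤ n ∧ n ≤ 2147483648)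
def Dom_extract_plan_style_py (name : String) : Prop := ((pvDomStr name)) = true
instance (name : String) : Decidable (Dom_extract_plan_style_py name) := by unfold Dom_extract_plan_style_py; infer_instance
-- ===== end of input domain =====

-- B replaces the startswith loop over full bracketed prefixes by extracting the tag
-- between a leading '[' and the first ']' once and mapping it through a dict.

-- ===== PORT A =====
def pvPrefixes : List (String × String) :=
  [("[promo]", "promotional"), ("[popular]", "popular"), ("[normal]", "normal")]

def pvALoop (raw lowered : String) : List (String × String) → String × String
  | [] => ("normal", raw)
  | (token, style) :: rest =>
    if PySem.Str.startswith lowered token then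
      let clean := PySem.Str.lstrip (PySem.Str.slice raw (some (PySem.Str.len token)) none)
      (style, if clean = "" then raw else clean)
    else pvALoop raw lowered rest

def extract_plan_style_py (name : String) : String × String :=
  let raw := PySem.Str.strip name
  let lowered := PySem.Str.lower raw
  pvALoop raw lowered pvPrefixes

-- ===== PORT B =====
def pvStyles : PySem.Dict String String :=
  PySem.Dict.ofList [("promo", "promotional"), ("popular", "popular"), ("normal", "normal")]

def extract_plan_style_py_alt (name : String) : String × String :=
  let raw := PySem.Str.strip name
  if PySem.Str.startswith raw "[" then
    let close := PySem.Str.find raw "]"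
    if close = -1 then ("normal", raw)
    else
      match pvStyles.get? (PySem.Str.lower (PySem.Str.slice raw (some 1) (some close))) with
      | some style =>
        let clean := PySem.Str.lstrip (PySem.Str.slice raw (some (close + 1)) none)
        (style, if clean = "" then raw else clean)
      | none => ("normal", raw)
  else ("normal", raw)

-- ===== PRECONDITION & SPEC =====
def Spec_extract_plan_style_py (name : String) (out : String × String) : Prop := out = extract_plan_style_py_alt name
instance (name : String) (out : String × String) : Decidable (Spec_extract_plan_style_py name out) := by unfold Spec_extract_plan_style_py; infer_instance

-- ===== CLAIM (what is proved, stated in full; the proofs are below) =====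
def Claim_equal_extract_plan_style_py : Prop := ∀ (name : String), Dom_extract_plan_style_py name → Spec_extract_plan_style_py name (extract_plan_style_py name)

-- ===== LEMMAS AND PROOFS =====

lemma pv_lowerChar_fix (c d : Char) (hd : d = '[' ∨ d = ']') :
    PySem.Chars.lowerChar c = d ↔ c = d := by
  constructor
  · intro he
    unfold PySem.Chars.lowerChar PySem.Chars.isupper at he
    split at he
    · rename_i h
      simp only [Bool.and_eq_true, decide_eq_true_eq] at h
      obtain ⟨h1, h2⟩ := h
      have hc1 : 65 ≤ c.toNat := h1
      have hc2 : c.toNat ≤ 90 := h2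
      exfalso
      have : (Char.ofNat (c.toNat + 32)).toNat = d.toNat := by rw [he]
      rw [Char.toNat_ofNat] at this
      rw [if_pos (Or.inl (by omega))] at this
      have h91 : ('[' : Char).toNat = 91 := by decide
      have h93 : (']' : Char).toNat = 93 := by decide
      rcases hd with h | h <;> subst h <;> omega
    · exact he
  · intro he; subst he
    rcases hd with h | h <;> subst h <;> decide

lemma pv_mem_lower (m : List Char) : ']' ∈ PySem.Chars.lower m ↔ ']' ∈ m := by
  simp only [PySem.Chars.lower, List.mem_map]
  constructor
  · rintro ⟨c, hc, he⟩
    rwa [(pv_lowerChar_fix c ']' (Or.inr rfl)).mp he] at hc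
  · intro h; exact ⟨']', h, by decide⟩

lemma pv_split_first (t : List Char) (h : ']' ∈ t) :
    ∃ m r, t = m ++ ']' :: r ∧ ']' ∉ m := by
  induction t with
  | nil => simp at h
  | cons a t ih =>
    by_cases ha : a = ']'
    · exact ⟨[], t, by simp [ha], by simp⟩
    · have h' : ']' ∈ t := by
        rcases List.mem_cons.mp h with h | h
        · exact absurd h.symm ha
        · exact h
      obtain ⟨m, r, hm, hnm⟩ := ih h'
      exact ⟨a :: m, r, by simp [hm], by simp [hnm]; exact fun he => ha he.symm⟩

lemma pv_singleton_prefix (c : Char) (xs : List Char) : [c] <+: xs ↔ xs[0]? = some c := by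
  cases xs with
  | nil => simp
  | cons a t => simp [List.cons_prefix_cons, eq_comm]

lemma pv_find_first (m r : List Char) (hm : ']' ∉ m) :
    PySem.Chars.find (m ++ ']' :: r) [']'] = (m.length : Int) := by
  have hin : [']'] <:+: (m ++ ']' :: r) := ⟨m, r, by simp⟩
  have h0 : 0 ≤ PySem.Chars.find (m ++ ']' :: r) [']'] :=
    (PySem.Chars.find_nonneg_iff _ _).mpr hin
  obtain ⟨h1, h2⟩ := PySem.Chars.find_spec h0
  set k := (PySem.Chars.find (m ++ ']' :: r) [']']).toNat with hk
  have hle : k ≤ m.length := by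
    by_contra hgt
    exact h2 m.length (by omega) (by simp)
  have hge : ¬ k < m.length := by
    intro hlt
    rw [List.drop_append_of_le_length (le_of_lt hlt),
        List.drop_eq_getElem_cons hlt] at h1
    have h3 := (pv_singleton_prefix _ _).mp h1
    rw [List.cons_append] at h3
    simp only [List.getElem?_cons_zero, Option.some.injEq] at h3
    exact hm (h3 ▸ List.getElem_mem hlt)
  have : k = m.length := by omega
  omega

lemma pv_prefix_bracket : ∀ (u m v w : List Char), ']' ∉ u → ']' ∉ m →
    (u ++ ']' :: v <+: m ++ ']' :: w) → u = m := by
  intro u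
  induction u with
  | nil =>
    intro m v w _ hm h
    cases m with
    | nil => rfl
    | cons b m' =>
      simp only [List.nil_append, List.cons_append, List.cons_prefix_cons] at h
      exact absurd (h.1 ▸ List.mem_cons_self) hm
  | cons a u' ih =>
    intro m v w hu hm h
    cases m with
    | nil =>
      simp only [List.cons_append, List.nil_append, List.cons_prefix_cons] at h
      exact absurd (h.1 ▸ List.mem_cons_self) hu
    | cons b m' =>
      simp only [List.cons_append, List.cons_prefix_cons] at h
      have := ih m' v w (fun hx => hu (List.mem_cons_of_mem _ hx))
        (fun hx => hm (List.mem_cons_of_mem _ hx)) h.2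
      rw [h.1, this]

lemma pv_singleton_infix (c : Char) (xs : List Char) : [c] <:+: xs ↔ c ∈ xs := by
  constructor
  · intro h; exact h.subset (List.mem_singleton_self c)
  · intro h
    obtain ⟨u, v, huv⟩ := List.append_of_mem h
    exact ⟨u, v, by simp [huv]⟩

lemma pv_head_lower (s t : String) (ht : t.toList.head? = some '[')
    (h : PySem.Str.startswith (PySem.Str.lower s) t = true) :
    PySem.Str.startswith s "[" = true := by
  rw [PySem.Str.startswith_eq, PySem.Str.toList_lower, PySem.Chars.startswith_iff] at h
  rw [PySem.Str.startswith_eq, PySem.Chars.startswith_iff]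
  cases htl : t.toList with
  | nil => simp [htl] at ht
  | cons a tt =>
    rw [htl] at h ht
    simp only [List.head?_cons, Option.some.injEq] at ht
    cases hsl : s.toList with
    | nil =>
      rw [hsl] at h
      simp [PySem.Chars.lower] at h
    | cons c cs =>
      rw [hsl] at h
      simp only [PySem.Chars.lower, List.map_cons, List.cons_prefix_cons] at h
      have hc : c = '[' := (pv_lowerChar_fix c '[' (Or.inl rfl)).mp (ht ▸ h.1.symm)
      show ("[" : String).toList <+: c :: cs
      rw [hc, (by decide : ("[" : String).toList = ['['])]
      exact ⟨cs, rfl⟩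

lemma pv_startswith_iff (m r u : List Char) (hu : ']' ∉ u) (hm : ']' ∉ m) :
    (PySem.Chars.startswith (PySem.Chars.lower ('[' :: (m ++ ']' :: r))) ('[' :: (u ++ [']'])) = true)
      ↔ PySem.Chars.lower m = u := by
  have hlow : PySem.Chars.lower ('[' :: (m ++ ']' :: r))
      = '[' :: (PySem.Chars.lower m ++ ']' :: PySem.Chars.lower r) := by
    simp only [PySem.Chars.lower, List.map_cons, List.map_append]
    rw [show PySem.Chars.lowerChar '[' = '[' from by decide,
        show PySem.Chars.lowerChar ']' = ']' from by decide]
  rw [hlow, PySem.Chars.startswith_iff, List.cons_prefix_cons]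
  constructor
  · intro h
    have hml : ']' ∉ PySem.Chars.lower m := fun hx => hm ((pv_mem_lower m).mp hx)
    exact (pv_prefix_bracket u (PySem.Chars.lower m) [] (PySem.Chars.lower r) hu hml h.2).symm
  · intro h
    exact ⟨rfl, by rw [← h]; exact ⟨PySem.Chars.lower r, by simp⟩⟩


theorem pv_core (s : String) :
    pvALoop s (PySem.Str.lower s) pvPrefixes =
      (if PySem.Str.startswith s "[" then
        let close := PySem.Str.find s "]"
        if close = -1 then ("normal", s)
        else
          match pvStyles.get? (PySem.Str.lower (PySem.Str.slice s (some 1) (some close))) with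
          | some style =>
            let clean := PySem.Str.lstrip (PySem.Str.slice s (some (close + 1)) none)
            (style, if clean = "" then s else clean)
          | none => ("normal", s)
      else ("normal", s)) := by
  cases hb : PySem.Str.startswith s "[" with
  | false =>
    have h1 : PySem.Str.startswith (PySem.Str.lower s) "[promo]" = false := by
      cases hq : PySem.Str.startswith (PySem.Str.lower s) "[promo]" with
      | false => rfl
      | true => rw [pv_head_lower s _ (by decide) hq] at hb; simp at hb
    have h2 : PySem.Str.startswith (PySem.Str.lower s) "[popular]" = false := by
      cases hq : PySem.Str.startswith (PySem.Str.lower s) "[popular]" with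
      | false => rfl
      | true => rw [pv_head_lower s _ (by decide) hq] at hb; simp at hb
    have h3 : PySem.Str.startswith (PySem.Str.lower s) "[normal]" = false := by
      cases hq : PySem.Str.startswith (PySem.Str.lower s) "[normal]" with
      | false => rfl
      | true => rw [pv_head_lower s _ (by decide) hq] at hb; simp at hb
    have hL : pvALoop s (PySem.Str.lower s) pvPrefixes = ("normal", s) := by
      simp only [pvPrefixes, pvALoop]
      rw [h1, h2, h3]
      simp
    rw [hL]; simp
  | true =>
    -- s = '[' :: t
    obtain ⟨t, hl0⟩ : ∃ t, s.toList = '[' :: t := by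
      rw [PySem.Str.startswith_eq, PySem.Chars.startswith_iff] at hb
      obtain ⟨t, ht⟩ := hb
      exact ⟨t, by rw [← ht]; rfl⟩
    by_cases hmem : ']' ∈ s.toList
    · have hmt : ']' ∈ t := by
        rw [hl0] at hmem
        rcases List.mem_cons.mp hmem with h | h
        · exact absurd h (by decide)
        · exact h
      obtain ⟨m, r, hmr, hm⟩ := pv_split_first t hmt
      have hl : s.toList = '[' :: (m ++ ']' :: r) := by rw [hl0, hmr]
      have hm' : ']' ∉ '[' :: m := by
        intro hx
        rcases List.mem_cons.mp hx with h | h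
        · exact absurd h (by decide)
        · exact hm h
      have hfind : PySem.Str.find s "]" = ((m.length : Int) + 1) := by
        rw [PySem.Str.find_eq, hl, show ("]" : String).toList = [']'] from rfl,
            show ('[' :: (m ++ ']' :: r)) = (('[' :: m) ++ ']' :: r) from rfl,
            pv_find_first ('[' :: m) r hm']
        simp [add_comm]
      have hne : ¬ ((m.length : Int) + 1 = -1) := by omega
      have hslice : (PySem.Str.slice s (some 1) (some ((m.length : Int) + 1))).toList = m := by
        rw [PySem.Str.toList_slice, PySem.Chars.slice_eq_listSlice, hl,
            show (some (1 : Int)) = some ((1 : Nat) : Int) from rfl,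
            show ((m.length : Int) + 1) = ((1 : Nat) : Int) + ((m.length : Nat) : Int) by push_cast; ring,
            PySem.List.slice_natCast_add]
        simp
      have hkey : PySem.Str.lower (PySem.Str.slice s (some 1) (some ((m.length : Int) + 1)))
          = String.ofList (PySem.Chars.lower m) := by
        rw [PySem.Str.lower, hslice]
      have htok : ∀ (tok : String) (u : List Char), ']' ∉ u → tok.toList = '[' :: (u ++ [']']) →
          (PySem.Str.startswith (PySem.Str.lower s) tok = true ↔ PySem.Chars.lower m = u) := by
        intro tok u hu htl
        rw [PySem.Str.startswith_eq, PySem.Str.toList_lower, hl, htl]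
        exact pv_startswith_iff m r u hu hm
      have hp1 := htok "[promo]" "promo".toList (by decide) (by decide)
      have hp2 := htok "[popular]" "popular".toList (by decide) (by decide)
      have hp3 := htok "[normal]" "normal".toList (by decide) (by decide)
      have hlen : PySem.Chars.lower m ≠ [] → True := fun _ => trivial
      clear hlen
      simp only [hfind, if_neg hne, hkey]
      by_cases hq1 : PySem.Chars.lower m = "promo".toList
      · have hlen : m.length = 5 := by
          have := congrArg List.length hq1
          simpa [PySem.Chars.lower] using this
        simp only [pvPrefixes, pvALoop]
        rw [hp1.mpr hq1, hq1, String.ofList_toList,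
            show pvStyles.get? "promo" = some "promotional" from rfl]
        simp [hlen, PySem.Str.len]
      · have hf1 : PySem.Str.startswith (PySem.Str.lower s) "[promo]" = false := by
          cases hx : PySem.Str.startswith (PySem.Str.lower s) "[promo]" with
          | false => rfl
          | true => exact absurd (hp1.mp hx) hq1
        by_cases hq2 : PySem.Chars.lower m = "popular".toList
        · have hlen : m.length = 7 := by
            have := congrArg List.length hq2
            simpa [PySem.Chars.lower] using this
          simp only [pvPrefixes, pvALoop]
          rw [hf1, hp2.mpr hq2, hq2, String.ofList_toList,
              show pvStyles.get? "popular" = some "popular" from rfl]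
          simp [hlen, PySem.Str.len]
        · have hf2 : PySem.Str.startswith (PySem.Str.lower s) "[popular]" = false := by
            cases hx : PySem.Str.startswith (PySem.Str.lower s) "[popular]" with
            | false => rfl
            | true => exact absurd (hp2.mp hx) hq2
          by_cases hq3 : PySem.Chars.lower m = "normal".toList
          · have hlen : m.length = 6 := by
              have := congrArg List.length hq3
              simpa [PySem.Chars.lower] using this
            simp only [pvPrefixes, pvALoop]
            rw [hf1, hf2, hp3.mpr hq3, hq3, String.ofList_toList,
                show pvStyles.get? "normal" = some "normal" from rfl]
            simp [hlen, PySem.Str.len]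
          · have hf3 : PySem.Str.startswith (PySem.Str.lower s) "[normal]" = false := by
              cases hx : PySem.Str.startswith (PySem.Str.lower s) "[normal]" with
              | false => rfl
              | true => exact absurd (hp3.mp hx) hq3
            have hnone : pvStyles.get? (String.ofList (PySem.Chars.lower m)) = none := by
              have e1 : ¬ (("promo" : String) = String.ofList (PySem.Chars.lower m)) := by
                intro h
                exact hq1 (by have h2 := congrArg String.toList h.symm; rw [String.toList_ofList] at h2; exact h2)
              have e2 : ¬ (("popular" : String) = String.ofList (PySem.Chars.lower m)) := by
                intro h
                exact hq2 (by have h2 := congrArg String.toList h.symm; rw [String.toList_ofList] at h2; exact h2)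
              have e3 : ¬ (("normal" : String) = String.ofList (PySem.Chars.lower m)) := by
                intro h
                exact hq3 (by have h2 := congrArg String.toList h.symm; rw [String.toList_ofList] at h2; exact h2)
              rw [show pvStyles = PySem.Dict.mk
                    [("promo", "promotional"), ("popular", "popular"), ("normal", "normal")] from rfl]
              simp [PySem.Dict.get?_mk_cons, PySem.Dict.get?, e1, e2, e3]
            rw [hnone]
            simp only [pvPrefixes, pvALoop]
            rw [hf1, hf2, hf3]
            simp
    · have hfind : PySem.Str.find s "]" = -1 := by
        rw [PySem.Str.find_eq_neg_one_iff, show ("]" : String).toList = [']'] from rfl,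
            pv_singleton_infix]
        exact hmem
      have hA : ∀ (tok : String), ']' ∈ tok.toList →
          PySem.Str.startswith (PySem.Str.lower s) tok = false := by
        intro tok htok
        cases hq : PySem.Str.startswith (PySem.Str.lower s) tok with
        | false => rfl
        | true =>
          exfalso
          rw [PySem.Str.startswith_eq, PySem.Str.toList_lower, PySem.Chars.startswith_iff] at hq
          exact hmem ((pv_mem_lower s.toList).mp (hq.subset htok))
      have h1 := hA "[promo]" (by decide)
      have h2 := hA "[popular]" (by decide)
      have h3 := hA "[normal]" (by decide)
      have hL : pvALoop s (PySem.Str.lower s) pvPrefixes = ("normal", s) := by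
        simp only [pvPrefixes, pvALoop]
        rw [h1, h2, h3]
        simp
      rw [hL]
      simp only [hfind, if_pos rfl, if_true]

-- ===== VERDICT (by name: the statement is the Claim_ definition above) =====
theorem extract_plan_style_py_spec : Claim_equal_extract_plan_style_py := by
  intro name _
  show extract_plan_style_py name = extract_plan_style_py_alt name
  unfold extract_plan_style_py extract_plan_style_py_alt
  exact pv_core (PySem.Str.strip name)
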